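-- pv_equiv track=rewrite | github.com/linhdvu14/leetcode-solutions | code/890_find-and-replace-pattern.py | findAndReplacePattern_1
-- ===== SOURCE A (Python) =====
-- def findAndReplacePattern_1(words, pattern):
--     """
--     :type words: List[str]
--     :type pattern: str
--     :rtype: List[str]
--     """
--     def match(word1, word2):
--         map1, map2 = {}, {}
--         for c1, c2 in zip(word1, word2):  # pair of corresponding chars
--             if c1 not in map1:
--                 map1[c1] = c2
--             if c2 not in map2:
--                 map2[c2] = c1
--             if map1[c1] != c2 or map2[c2] != c1:
--                 return False
--         return True
--     return [word for word in words if match(word, pattern)]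
-- ===== SOURCE B (Python) =====
-- def findAndReplacePattern_1(words, pattern):
--     """
--     :type words: List[str]
--     :type pattern: str
--     :rtype: List[str]
--     """
--     # word matches pattern iff corresponding characters first appear at the
--     # same position: compare first-occurrence indices pair by pair.
--     def matches(word):
--         return all(word.index(a) == pattern.index(b) for a, b in zip(word, pattern))
--     return [word for word in words if matches(word)]
-- ===== Notes on version B (the rewrite author's own statement) =====
-- stated objective: idiomatic
-- what changed: Replaces the two-way char-map bijection check with a one-line canonical-form comparison: for each zipped character pair, the first-occurrence index in the word must equal the first-occurrence index in the pattern (all(word.index(a) == pattern.index(b) for a, b in zip(word, pattern))).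
import Mathlib
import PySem

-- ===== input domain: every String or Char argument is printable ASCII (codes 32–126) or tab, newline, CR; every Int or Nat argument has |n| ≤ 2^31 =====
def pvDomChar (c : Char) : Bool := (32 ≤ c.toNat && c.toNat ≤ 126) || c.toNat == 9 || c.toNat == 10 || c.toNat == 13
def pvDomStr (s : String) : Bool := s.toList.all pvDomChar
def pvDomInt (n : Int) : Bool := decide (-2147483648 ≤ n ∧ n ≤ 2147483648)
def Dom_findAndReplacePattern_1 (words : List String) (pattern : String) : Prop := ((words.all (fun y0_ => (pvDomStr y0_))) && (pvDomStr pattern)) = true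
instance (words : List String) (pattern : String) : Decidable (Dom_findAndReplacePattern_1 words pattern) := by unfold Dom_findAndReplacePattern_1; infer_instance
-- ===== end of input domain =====

-- B replaces A's two-way char-map bijection check with a one-line canonical-form
-- comparison (for each zipped character pair, first-occurrence index in the word
-- must equal first-occurrence index in the pattern); objective: idiomatic.

-- ===== PORT A =====
-- the inner 'match' loop of A: state = the two dicts map1, map2; early 'return False' = result false
def matchLoopA (m1 m2 : PySem.Dict Char Char) : List (Char × Char) → Bool
  | [] => true
  | (c1, c2) :: rest =>
    -- if c1 not in map1: map1[c1] = c2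
    let m1' := if m1.contains c1 then m1 else m1.insert c1 c2
    -- if c2 not in map2: map2[c2] = c1
    let m2' := if m2.contains c2 then m2 else m2.insert c2 c1
    -- map1[c1] != c2 or map2[c2] != c1  (both keys are present here, so getD's default is never used)
    if m1'.getD c1 c2 ≠ c2 ∨ m2'.getD c2 c1 ≠ c1 then false
    else matchLoopA m1' m2' rest

def findAndReplacePattern_1 (words : List String) (pattern : String) : List String :=
  -- [word for word in words if match(word, pattern)]; zip of two strings = zip of their char lists
  words.filter (fun word =>
    matchLoopA PySem.Dict.empty PySem.Dict.empty (word.toList.zip pattern.toList))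

-- ===== PORT B =====
-- matches(word) = all(word.index(a) == pattern.index(b) for a, b in zip(word, pattern));
-- a ∈ word and b ∈ pattern always (they come from zip), so str.index never raises (getD 0 unreachable)
def matchesAlt (pat : List Char) (w : String) : Bool :=
  (w.toList.zip pat).all (fun p =>
    (PySem.List.index? w.toList p.1).getD 0 == (PySem.List.index? pat p.2).getD 0)

def findAndReplacePattern_1_alt (words : List String) (pattern : String) : List String :=
  words.filter (matchesAlt pattern.toList)

-- ===== PRECONDITION & SPEC =====
def Spec_findAndReplacePattern_1 (words : List String) (pattern : String) (out : List String) : Prop := out = findAndReplacePattern_1_alt words pattern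
instance (words : List String) (pattern : String) (out : List String) : Decidable (Spec_findAndReplacePattern_1 words pattern out) := by unfold Spec_findAndReplacePattern_1; infer_instance

-- ===== CLAIM (what is proved, stated in full; the proofs are below) =====
def Claim_equal_findAndReplacePattern_1 : Prop := ∀ (words : List String) (pattern : String), Dom_findAndReplacePattern_1 words pattern → Spec_findAndReplacePattern_1 words pattern (findAndReplacePattern_1 words pattern)

-- ===== LEMMAS AND PROOFS =====

-- consistency of a list of char pairs: it describes a partial bijection
def ConsP (ps : List (Char × Char)) : Prop :=
  ∀ p ∈ ps, ∀ q ∈ ps, (p.1 = q.1 ↔ p.2 = q.2)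

-- the two dicts are mutually inverse
def InvD (m1 m2 : PySem.Dict Char Char) : Prop :=
  ∀ a b, m1.get? a = some b ↔ m2.get? b = some a

lemma step_get (m : PySem.Dict Char Char) (c v a : Char) :
    ((if m.contains c then m else m.insert c v).get? a)
      = if a = c then some ((m.get? c).getD v) else m.get? a := by
  by_cases hc : m.contains c = true
  · rw [PySem.Dict.contains_eq_isSome_get?] at hc
    cases h : m.get? c with
    | none => simp [h] at hc
    | some b =>
      simp only [PySem.Dict.contains_eq_isSome_get?, h]
      by_cases ha : a = c <;> simp [ha, h]
  · have hc' : m.get? c = none := by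
      rw [PySem.Dict.contains_eq_isSome_get?] at hc
      cases h : m.get? c with
      | none => rfl
      | some b => simp [h] at hc
    simp only [PySem.Dict.contains_eq_isSome_get?, hc']
    by_cases ha : a = c <;> simp [ha, PySem.Dict.get?_insert]

lemma matchLoopA_iff (ps : List (Char × Char)) :
    ∀ m1 m2, InvD m1 m2 →
      (matchLoopA m1 m2 ps = true ↔
        (ConsP ps ∧ ∀ p ∈ ps, (∀ b, m1.get? p.1 = some b → b = p.2) ∧
                              (∀ a, m2.get? p.2 = some a → a = p.1))) := by
  induction ps with
  | nil => intro m1 m2 _; simp [matchLoopA, ConsP]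
  | cons hd rest ih =>
    obtain ⟨c1, c2⟩ := hd
    intro m1 m2 hinv
    have unf : matchLoopA m1 m2 ((c1, c2) :: rest) =
        if (if m1.contains c1 then m1 else m1.insert c1 c2).getD c1 c2 ≠ c2 ∨
           (if m2.contains c2 then m2 else m2.insert c2 c1).getD c2 c1 ≠ c1 then false
        else matchLoopA (if m1.contains c1 then m1 else m1.insert c1 c2)
                        (if m2.contains c2 then m2 else m2.insert c2 c1) rest := rfl
    rw [unf]
    set M1 := if m1.contains c1 then m1 else m1.insert c1 c2 with hM1
    set M2 := if m2.contains c2 then m2 else m2.insert c2 c1 with hM2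
    set v1 := (m1.get? c1).getD c2 with hv1
    set v2 := (m2.get? c2).getD c1 with hv2
    have g1 : ∀ a, M1.get? a = if a = c1 then some v1 else m1.get? a := fun a => step_get m1 c1 c2 a
    have g2 : ∀ b, M2.get? b = if b = c2 then some v2 else m2.get? b := fun b => step_get m2 c2 c1 b
    have gd1 : M1.getD c1 c2 = v1 := by
      rw [PySem.Dict.getD_eq_get?_getD, g1 c1]; simp
    have gd2 : M2.getD c2 c1 = v2 := by
      rw [PySem.Dict.getD_eq_get?_getD, g2 c2]; simp
    by_cases hpass : v1 = c2 ∧ v2 = c1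
    · obtain ⟨e1, e2⟩ := hpass
      rw [if_neg (by simp [gd1, gd2, e1, e2])]
      have hP1 : ∀ b, m1.get? c1 = some b → b = c2 := by
        intro b hb
        have hvb : v1 = b := by rw [hv1, hb]; rfl
        exact hvb.symm.trans e1
      have hP2 : ∀ a, m2.get? c2 = some a → a = c1 := by
        intro a ha
        have hva : v2 = a := by rw [hv2, ha]; rfl
        exact hva.symm.trans e2
      have g1' : ∀ a, M1.get? a = if a = c1 then some c2 else m1.get? a := by
        intro a; rw [g1 a, e1]
      have g2' : ∀ b, M2.get? b = if b = c2 then some c1 else m2.get? b := by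
        intro b; rw [g2 b, e2]
      have hinv' : InvD M1 M2 := by
        intro a b
        rw [g1' a, g2' b]
        by_cases ha : a = c1 <;> by_cases hb : b = c2
        · simp [ha, hb]
        · simp only [ha, hb, if_pos]
          constructor
          · intro h; exact absurd (Option.some.inj h).symm hb
          · intro h; exact absurd (hP1 b ((hinv c1 b).mpr (ha ▸ h))) hb
        · simp only [ha, hb]
          constructor
          · intro h; exact absurd (hP2 a ((hinv a c2).mp (hb ▸ h))) ha
          · intro h; exact absurd (Option.some.inj h).symm ha
        · simp only [if_neg ha, if_neg hb]; exact hinv a b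
      rw [ih M1 M2 hinv']
      have compat_iff : ∀ p : Char × Char,
          ((∀ b, M1.get? p.1 = some b → b = p.2) ∧ (∀ a, M2.get? p.2 = some a → a = p.1))
          ↔ ((∀ b, m1.get? p.1 = some b → b = p.2) ∧ (∀ a, m2.get? p.2 = some a → a = p.1)
             ∧ (p.1 = c1 ↔ p.2 = c2)) := by
        rintro ⟨d1, d2⟩
        simp only [g1', g2']
        by_cases hd1 : d1 = c1 <;> by_cases hd2 : d2 = c2
        · subst hd1; subst hd2
          constructor
          · intro _; exact ⟨hP1, hP2, by simp⟩
          · intro _; constructor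
            · intro b hb; simp at hb; exact hb.symm
            · intro a ha; simp at ha; exact ha.symm
        · simp only [hd1, if_pos, if_neg hd2]
          constructor
          · rintro ⟨h1, _⟩; exact absurd (h1 c2 rfl) (by simpa using Ne.symm hd2)
          · rintro ⟨_, _, hiff⟩; exact absurd (hiff.mp trivial) hd2
        · simp only [hd2, if_neg hd1, if_pos]
          constructor
          · rintro ⟨_, h2⟩; exact absurd (h2 c1 rfl) (by simpa using Ne.symm hd1)
          · rintro ⟨_, _, hiff⟩; exact absurd (hiff.mpr trivial) hd1
        · simp only [if_neg hd1, if_neg hd2]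
          constructor
          · rintro ⟨h1, h2⟩; exact ⟨h1, h2, by simp [hd1, hd2]⟩
          · rintro ⟨h1, h2, _⟩; exact ⟨h1, h2⟩
      have cons_cons : ConsP ((c1, c2) :: rest) ↔
          (ConsP rest ∧ ∀ q ∈ rest, (q.1 = c1 ↔ q.2 = c2)) := by
        unfold ConsP
        constructor
        · intro H
          refine ⟨fun p hp q hq => H p (List.mem_cons_of_mem _ hp) q (List.mem_cons_of_mem _ hq),
                  fun q hq => ?_⟩
          have := H q (List.mem_cons_of_mem _ hq) (c1, c2) List.mem_cons_self
          simpa using this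
        · rintro ⟨H1, H2⟩ p hp q hq
          rcases List.mem_cons.mp hp with rfl | hp' <;> rcases List.mem_cons.mp hq with rfl | hq'
          · exact ⟨fun _ => rfl, fun _ => rfl⟩
          · simpa [eq_comm] using (H2 q hq')
          · exact H2 p hp'
          · exact H1 p hp' q hq'
      rw [cons_cons, List.forall_mem_cons]
      constructor
      · rintro ⟨hcr, hM⟩
        exact ⟨⟨hcr, fun q hq => ((compat_iff q).mp (hM q hq)).2.2⟩,
               ⟨hP1, hP2⟩,
               fun p hp => ⟨((compat_iff p).mp (hM p hp)).1, ((compat_iff p).mp (hM p hp)).2.1⟩⟩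
      · rintro ⟨⟨hcr, hiff⟩, _, hm⟩
        exact ⟨hcr, fun p hp => (compat_iff p).mpr ⟨(hm p hp).1, (hm p hp).2, hiff p hp⟩⟩
    · rw [if_pos]
      · simp only [Bool.false_eq_true, false_iff]
        rintro ⟨_, hall⟩
        have hh := hall (c1, c2) List.mem_cons_self
        apply hpass
        constructor
        · cases h : m1.get? c1 with
          | none => rw [hv1, h]; rfl
          | some b => rw [hv1, h]; exact hh.1 b h
        · cases h : m2.get? c2 with
          | none => rw [hv2, h]; rfl
          | some a => rw [hv2, h]; exact hh.2 a h
      · rw [gd1, gd2]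
        by_cases h1 : v1 = c2
        · right; intro h2; exact hpass ⟨h1, h2⟩
        · left; exact h1

lemma matchLoopA_empty_iff (ps : List (Char × Char)) :
    matchLoopA PySem.Dict.empty PySem.Dict.empty ps = true ↔ ConsP ps := by
  rw [matchLoopA_iff ps _ _ (by intro a b; simp [PySem.Dict.get?_empty])]
  simp [PySem.Dict.get?_empty]

-- index? at the first position whose element is c
lemma index?_of_first (s : List Char) (c : Char) (k : Nat) (hk : k < s.length)
    (hke : s[k] = c) (hmin : ∀ j (hj : j < k), s[j]'(by omega) ≠ c) :
    PySem.List.index? s c = some k := by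
  induction s generalizing k with
  | nil => simp at hk
  | cons x t ih =>
    cases k with
    | zero =>
      simp only [List.getElem_cons_zero] at hke
      subst hke
      exact PySem.List.index?_cons_self x t
    | succ k' =>
      have hx : x ≠ c := by
        have := hmin 0 (Nat.succ_pos k')
        simpa using this
      rw [PySem.List.index?_cons_of_ne t hx]
      have ht : PySem.List.index? t c = some k' := by
        refine ih k' (by simpa using hk) (by simpa using hke) ?_
        intro j hj
        have := hmin (j + 1) (by omega)
        simpa using this
      rw [ht]; rfl

-- first-occurrence index of s[i] exists, is ≤ i, hits the same char and is minimal
lemma index?_getElem_spec (s : List Char) (i : Nat) (hi : i < s.length) :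
    ∃ k, PySem.List.index? s s[i] = some k ∧ k ≤ i ∧ ∃ (hk : k < s.length),
      s[k] = s[i] ∧ ∀ j (hj : j < k), s[j]'(by omega) ≠ s[i] := by
  have hmem : s[i] ∈ s := List.getElem_mem hi
  have hsome : (PySem.List.index? s s[i]).isSome = true :=
    (PySem.List.index?_isSome_iff s s[i]).mpr hmem
  obtain ⟨k, hk⟩ := Option.isSome_iff_exists.mp hsome
  obtain ⟨hklt, hke, hmin⟩ := PySem.List.getElem_of_index?_eq_some hk
  have hki : k ≤ i := by
    by_contra h
    exact hmin i (by omega) rfl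
  exact ⟨k, hk, hki, hklt, hke, fun j hj => hmin j hj⟩

-- ConsP of a zip, read off pointwise on indices below the common length
lemma consP_zip_iff (xs ys : List Char) :
    ConsP (xs.zip ys) ↔
      ∀ i (hi : i < min xs.length ys.length) j (hj : j < min xs.length ys.length),
        (xs[i]'(by omega) = xs[j]'(by omega) ↔ ys[i]'(by omega) = ys[j]'(by omega)) := by
  have hzlen : (xs.zip ys).length = min xs.length ys.length := List.length_zip
  constructor
  · intro H i hi j hj
    have hpi : (xs[i]'(by omega), ys[i]'(by omega)) ∈ xs.zip ys :=
      List.mem_iff_getElem.mpr ⟨i, by omega, List.getElem_zip⟩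
    have hpj : (xs[j]'(by omega), ys[j]'(by omega)) ∈ xs.zip ys :=
      List.mem_iff_getElem.mpr ⟨j, by omega, List.getElem_zip⟩
    exact H _ hpi _ hpj
  · intro H p hp q hq
    obtain ⟨i, hi, hpi⟩ := List.mem_iff_getElem.mp hp
    obtain ⟨j, hj, hqj⟩ := List.mem_iff_getElem.mp hq
    rw [List.getElem_zip] at hpi hqj
    subst hpi; subst hqj
    exact H i (by omega) j (by omega)

-- B's all-over-zip test decides exactly the partial-bijection property of the zip
lemma matchesAlt_iff_consP (xs ys : List Char) :
    ((xs.zip ys).all (fun p =>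
        (PySem.List.index? xs p.1).getD 0 == (PySem.List.index? ys p.2).getD 0) = true)
      ↔ ConsP (xs.zip ys) := by
  have hzlen : (xs.zip ys).length = min xs.length ys.length := List.length_zip
  have hall : ((xs.zip ys).all (fun p =>
        (PySem.List.index? xs p.1).getD 0 == (PySem.List.index? ys p.2).getD 0) = true)
      ↔ ∀ i (hi : i < min xs.length ys.length),
          (PySem.List.index? xs (xs[i]'(by omega))).getD 0
            = (PySem.List.index? ys (ys[i]'(by omega))).getD 0 := by
    rw [List.all_eq_true]
    constructor
    · intro H i hi
      have hp : (xs[i]'(by omega), ys[i]'(by omega)) ∈ xs.zip ys :=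
        List.mem_iff_getElem.mpr ⟨i, by omega, List.getElem_zip⟩
      simpa using H _ hp
    · intro H p hp
      obtain ⟨i, hi, hpi⟩ := List.mem_iff_getElem.mp hp
      rw [List.getElem_zip] at hpi
      subst hpi
      simpa using H i (by omega)
  rw [hall, consP_zip_iff xs ys]
  constructor
  · intro H i hi j hj
    obtain ⟨ki, hki, hkii, hklti, hkei, _⟩ := index?_getElem_spec xs i (by omega)
    obtain ⟨kj, hkj, hkjj, hkltj, hkej, _⟩ := index?_getElem_spec xs j (by omega)
    obtain ⟨ki', hki', _, hklti', hkei', _⟩ := index?_getElem_spec ys i (by omega)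
    obtain ⟨kj', hkj', _, hkltj', hkej', _⟩ := index?_getElem_spec ys j (by omega)
    have e1 : ki' = ((PySem.List.index? xs (xs[i]'(by omega))).getD 0 : Nat) := by
      rw [H i hi, hki']; rfl
    have e2 : kj' = ((PySem.List.index? xs (xs[j]'(by omega))).getD 0 : Nat) := by
      rw [H j hj, hkj']; rfl
    constructor
    · intro hij
      have : ki' = kj' := by rw [e1, e2, hij]
      calc ys[i]'(by omega) = ys[ki']'(by omega) := hkei'.symm
        _ = ys[kj']'(by omega) := by congr 1
        _ = ys[j]'(by omega) := hkej'
    · intro hij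
      have hkik : (ki : Nat) = ((PySem.List.index? ys (ys[i]'(by omega))).getD 0) := by
        rw [← H i hi, hki]; rfl
      have hkjk : (kj : Nat) = ((PySem.List.index? ys (ys[j]'(by omega))).getD 0) := by
        rw [← H j hj, hkj]; rfl
      have : ki = kj := by rw [hkik, hkjk, hij]
      calc xs[i]'(by omega) = xs[ki]'(by omega) := hkei.symm
        _ = xs[kj]'(by omega) := by congr 1
        _ = xs[j]'(by omega) := hkej
  · intro H i hi
    obtain ⟨k, hk, hkle, hklt, hke, hmin⟩ := index?_getElem_spec xs i (by omega)
    have hyk : PySem.List.index? ys (ys[i]'(by omega)) = some k := by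
      apply index?_of_first ys _ k (by omega)
      · exact (H k (by omega) i hi).mp hke
      · intro j hj hbj
        exact hmin j hj ((H j (by omega) i hi).mpr hbj)
    rw [hk, hyk]

lemma key_lemma (w p : String) :
    matchLoopA PySem.Dict.empty PySem.Dict.empty (w.toList.zip p.toList)
      = matchesAlt p.toList w := by
  unfold matchesAlt
  rw [Bool.eq_iff_iff, matchLoopA_empty_iff, matchesAlt_iff_consP]

-- ===== VERDICT (by name: the statement is the Claim_ definition above) =====
theorem findAndReplacePattern_1_spec : Claim_equal_findAndReplacePattern_1 := by
  intro words pattern _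
  unfold Spec_findAndReplacePattern_1 findAndReplacePattern_1 findAndReplacePattern_1_alt
  exact List.filter_congr (fun w _ => key_lemma w pattern)
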